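-- pv_equiv track=rewrite | github.com/XDextX/Junior-Developer-G04 | C11/Tarea04.py | contar_impares_pares_y_cero
-- ===== SOURCE A (Python) =====
-- def contar_impares_pares_y_cero(mat: list[list[int]]):
--     pares = 0
--     impares = 0
--     cero = 0
--     for fila in range(len(mat)):
--         for col in range(len(mat[fila])):
--             if mat[fila][col] == 0:
--                 cero += 1
--             elif mat[fila][col] % 2:
--                 pares += 1
--             else:
--                 impares += 1
--     return impares, pares, cero
-- ===== SOURCE B (Python) =====
-- def contar_impares_pares_y_cero(mat: list[list[int]]):
--     flat = [x for fila in mat for x in fila]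
--     total = sum(len(fila) for fila in mat)
--     ceros = flat.count(0)
--     impares = sum(1 for x in flat if x % 2)
--     # nonzero evens derived by subtraction; A's return order is (evens, odds, zeros)
--     return total - ceros - impares, impares, ceros
-- ===== Notes on version B (the rewrite author's own statement) =====
-- stated objective: alternative
-- what changed: B flattens the matrix once and computes zeros and odds by separate counts, deriving the nonzero-even count arithmetically as total - zeros - odds instead of A's per-element three-way branch over index ranges.
import Mathlib
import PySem

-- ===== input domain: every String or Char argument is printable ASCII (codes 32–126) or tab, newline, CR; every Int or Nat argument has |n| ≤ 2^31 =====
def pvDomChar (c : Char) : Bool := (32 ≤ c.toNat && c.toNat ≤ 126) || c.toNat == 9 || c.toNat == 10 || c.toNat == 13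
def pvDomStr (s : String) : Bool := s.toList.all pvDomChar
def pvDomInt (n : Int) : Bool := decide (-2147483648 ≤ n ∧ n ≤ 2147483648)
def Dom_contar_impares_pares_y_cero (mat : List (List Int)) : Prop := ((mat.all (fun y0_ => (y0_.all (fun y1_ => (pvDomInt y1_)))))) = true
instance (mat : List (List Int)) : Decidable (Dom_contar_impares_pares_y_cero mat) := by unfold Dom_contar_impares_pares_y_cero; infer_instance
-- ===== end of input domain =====

-- B counts zeros and odds by separate passes over the flattened matrix and derives
-- the nonzero-even count by subtraction, replacing A's indexed three-way branch (objective: alternative).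

-- ===== PORT A =====
-- 'return impares, pares, cero' : the reordering of A's three counters
def pvRet (st : Int × Int × Int) : Int × Int × Int := (st.2.1, st.1, st.2.2)

-- state = (pares, impares, cero) exactly as A's variables; A returns (impares, pares, cero)
def contar_impares_pares_y_cero (mat : List (List Int)) : Int × Int × Int :=
  pvRet ((PySem.List.pyRange 0 mat.length 1).foldl
    (fun (st : Int × Int × Int) fila =>
      (PySem.List.pyRange 0 (PySem.List.pyGetD mat fila []).length 1).foldl
        (fun (st : Int × Int × Int) col =>
          if PySem.List.pyGetD (PySem.List.pyGetD mat fila []) col 0 = 0 then (st.1, st.2.1, st.2.2 + 1)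
          else if PySem.Int.mod (PySem.List.pyGetD (PySem.List.pyGetD mat fila []) col 0) 2 ≠ 0 then (st.1 + 1, st.2.1, st.2.2)
          else (st.1, st.2.1 + 1, st.2.2)) st)
    (0, 0, 0))

-- ===== PORT B =====
def contar_impares_pares_y_cero_alt (mat : List (List Int)) : Int × Int × Int :=
  ((mat.map (fun fila => (fila.length : Int))).sum
     - PySem.List.count (mat.flatMap (fun fila => fila)) 0
     - ((mat.flatMap (fun fila => fila)).map (fun x => if PySem.Int.mod x 2 ≠ 0 then (1 : Int) else 0)).sum,
   ((mat.flatMap (fun fila => fila)).map (fun x => if PySem.Int.mod x 2 ≠ 0 then (1 : Int) else 0)).sum,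
   PySem.List.count (mat.flatMap (fun fila => fila)) 0)

-- ===== PRECONDITION & SPEC =====
def Spec_contar_impares_pares_y_cero (mat : List (List Int)) (out : Int × Int × Int) : Prop := out = contar_impares_pares_y_cero_alt mat
instance (mat : List (List Int)) (out : Int × Int × Int) : Decidable (Spec_contar_impares_pares_y_cero mat out) := by unfold Spec_contar_impares_pares_y_cero; infer_instance

-- ===== CLAIM (what is proved, stated in full; the proofs are below) =====
def Claim_equal_contar_impares_pares_y_cero : Prop := ∀ (mat : List (List Int)), Dom_contar_impares_pares_y_cero mat → Spec_contar_impares_pares_y_cero mat (contar_impares_pares_y_cero mat)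

-- ===== LEMMAS AND PROOFS =====

-- the per-element step of A's inner loop
def pvStep (st : Int × Int × Int) (x : Int) : Int × Int × Int :=
  if x = 0 then (st.1, st.2.1, st.2.2 + 1)
  else if PySem.Int.mod x 2 ≠ 0 then (st.1 + 1, st.2.1, st.2.2)
  else (st.1, st.2.1 + 1, st.2.2)

-- counts of a row in B's terms
def pvOdds (l : List Int) : Int := (l.map (fun x => if PySem.Int.mod x 2 ≠ 0 then (1 : Int) else 0)).sum
def pvCeros (l : List Int) : Int := PySem.List.count l 0

theorem pvFold_row (l : List Int) (st : Int × Int × Int) :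
    l.foldl pvStep st =
      (st.1 + pvOdds l, st.2.1 + ((l.length : Int) - pvCeros l - pvOdds l), st.2.2 + pvCeros l) := by
  induction l generalizing st with
  | nil => simp [pvOdds, pvCeros, PySem.List.count]
  | cons x xs ih =>
    have hm : PySem.Int.mod x 2 = x % 2 :=
      PySem.Int.mod_eq_emod_of_pos (show (0:Int) < 2 by norm_num)
    have hx : x % 2 = 0 ∨ x % 2 = 1 := Int.emod_two_eq x
    simp only [List.foldl_cons, ih, pvStep, pvOdds, pvCeros, PySem.List.count, List.map_cons,
      List.sum_cons, List.count_cons, hm]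
    by_cases h0 : x = 0
    · rcases hx with hc | hc
      · simp [h0, Prod.ext_iff]
        push_cast
        ring
      · exfalso; rw [h0] at hc; norm_num at hc
    · rcases hx with hc | hc
      · simp [h0, hc, Prod.ext_iff]
        ring
      · simp [h0, hc, Prod.ext_iff]
        constructor <;> ring

theorem pvFold_mat (mat : List (List Int)) (st : Int × Int × Int) :
    mat.foldl (fun st row => row.foldl pvStep st) st =
      (st.1 + pvOdds (mat.flatMap (fun f => f)),
       st.2.1 + ((mat.map (fun f => (f.length : Int))).sum
                  - pvCeros (mat.flatMap (fun f => f)) - pvOdds (mat.flatMap (fun f => f))),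
       st.2.2 + pvCeros (mat.flatMap (fun f => f))) := by
  induction mat generalizing st with
  | nil => simp [pvOdds, pvCeros, PySem.List.count]
  | cons r rs ih =>
    rw [List.foldl_cons, ih, pvFold_row]
    simp only [List.flatMap_cons, List.map_cons, List.sum_cons, pvOdds, pvCeros,
      PySem.List.count, List.count_append, List.map_append, List.sum_append, Prod.ext_iff]
    push_cast
    refine ⟨by ring, by ring, by ring⟩

-- ===== VERDICT (by name: the statement is the Claim_ definition above) =====
theorem contar_impares_pares_y_cero_spec : Claim_equal_contar_impares_pares_y_cero := by
  unfold Claim_equal_contar_impares_pares_y_cero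
  intro mat _
  unfold Spec_contar_impares_pares_y_cero contar_impares_pares_y_cero contar_impares_pares_y_cero_alt
  rw [PySem.List.foldl_pyRange_zero_pyGetD' mat []
      (fun (st : Int × Int × Int) row =>
        (PySem.List.pyRange 0 row.length 1).foldl
          (fun (st : Int × Int × Int) col =>
            if PySem.List.pyGetD row col 0 = 0 then (st.1, st.2.1, st.2.2 + 1)
            else if PySem.Int.mod (PySem.List.pyGetD row col 0) 2 ≠ 0 then (st.1 + 1, st.2.1, st.2.2)
            else (st.1, st.2.1 + 1, st.2.2)) st) (0, 0, 0)]
  have hrows : ∀ (st : Int × Int × Int) (row : List Int),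
      (PySem.List.pyRange 0 row.length 1).foldl
        (fun (st : Int × Int × Int) col =>
          if PySem.List.pyGetD row col 0 = 0 then (st.1, st.2.1, st.2.2 + 1)
          else if PySem.Int.mod (PySem.List.pyGetD row col 0) 2 ≠ 0 then (st.1 + 1, st.2.1, st.2.2)
          else (st.1, st.2.1 + 1, st.2.2)) st = row.foldl pvStep st := by
    intro st row
    exact PySem.List.foldl_pyRange_zero_pyGetD row 0 pvStep st
  simp only [hrows]
  rw [pvFold_mat]
  simp [pvRet, pvOdds, pvCeros]
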